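-- pv_equiv track=rewrite | github.com/MrBrantCode/unitest_baseline | mut_generate/mist_train_taco/taco_18459/solution.py | max_contests
-- ===== SOURCE A (Python) =====
-- def max_contests(N, A, B, P):
--     mn, md, mx = 0, 0, 0
--
--     for pi in P:
--         if pi <= A:
--             mn += 1
--         elif pi <= B:
--             md += 1
--         else:
--             mx += 1
--
--     return min(mn, md, mx)
-- ===== SOURCE B (Python) =====
-- def max_contests(N, A, B, P):
--     s = sorted(P)
--     i = 0
--     while i < len(s) and s[i] <= A:
--         i += 1
--     j = i
--     while j < len(s) and s[j] <= B:
--         j += 1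
--     return min(i, j - i, len(s) - j)
-- ===== Notes on version B (the rewrite author's own statement) =====
-- stated objective: alternative
-- what changed: B sorts the list once and locates the two bucket boundaries by scanning the sorted list, deriving the three counts from boundary indices, instead of A's per-element three-way branch counting.
import Mathlib
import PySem

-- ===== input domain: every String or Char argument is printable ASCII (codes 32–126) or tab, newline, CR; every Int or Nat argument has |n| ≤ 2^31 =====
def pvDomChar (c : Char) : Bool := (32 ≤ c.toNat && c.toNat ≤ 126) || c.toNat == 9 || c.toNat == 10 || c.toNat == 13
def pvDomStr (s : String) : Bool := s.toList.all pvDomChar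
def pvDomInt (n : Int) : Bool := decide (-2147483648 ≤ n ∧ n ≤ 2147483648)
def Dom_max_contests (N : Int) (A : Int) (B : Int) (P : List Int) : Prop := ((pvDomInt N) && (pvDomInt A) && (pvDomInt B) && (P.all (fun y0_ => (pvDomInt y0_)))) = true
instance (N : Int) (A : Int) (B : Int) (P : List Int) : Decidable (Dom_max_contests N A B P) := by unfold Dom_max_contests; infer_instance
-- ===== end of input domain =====

-- B sorts once and reads the three bucket counts off the two boundary indices in the sorted list (alternative decomposition, not faster).


-- ===== PORT A =====
def max_contests (N : Int) (A : Int) (B : Int) (P : List Int) : Int :=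
  let t := P.foldl (fun (st : Int × Int × Int) pi =>
    if pi ≤ A then (st.1 + 1, st.2.1, st.2.2)
    else if pi ≤ B then (st.1, st.2.1 + 1, st.2.2)
    else (st.1, st.2.1, st.2.2 + 1)) (0, 0, 0)
  min (min t.1 t.2.1) t.2.2

-- ===== PORT B =====
-- 'while i < len(s) and s[i] <= x: i += 1' starting from i
def scanLe (s : List Int) (x : Int) (i : Nat) : Nat :=
  if h : i < s.length then
    if s[i] ≤ x then scanLe s x (i + 1) else i
  else i
termination_by s.length - i

def max_contests_alt (N : Int) (A : Int) (B : Int) (P : List Int) : Int :=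
  let s := PySem.List.sorted P (fun p => p) false
  let i := scanLe s A 0
  let j := scanLe s B i
  min (min (i : Int) ((j : Int) - (i : Int))) ((s.length : Int) - (j : Int))

-- ===== PRECONDITION & SPEC =====
def Spec_max_contests (N : Int) (A : Int) (B : Int) (P : List Int) (out : Int) : Prop := out = max_contests_alt N A B P
instance (N : Int) (A : Int) (B : Int) (P : List Int) (out : Int) : Decidable (Spec_max_contests N A B P out) := by unfold Spec_max_contests; infer_instance

-- ===== CLAIM (what is proved, stated in full; the proofs are below) =====
def Claim_equal_max_contests : Prop := ∀ (N : Int) (A : Int) (B : Int) (P : List Int), Dom_max_contests N A B P → Spec_max_contests N A B P (max_contests N A B P)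

-- ===== LEMMAS AND PROOFS =====

-- A's fold adds the three bucket counts to the accumulator
theorem foldA_eq (A B : Int) : ∀ (P : List Int) (mn md mx : Int),
    P.foldl (fun (st : Int × Int × Int) pi =>
      if pi ≤ A then (st.1 + 1, st.2.1, st.2.2)
      else if pi ≤ B then (st.1, st.2.1 + 1, st.2.2)
      else (st.1, st.2.1, st.2.2 + 1)) (mn, md, mx)
    = (mn + (P.countP (fun p => decide (p ≤ A)) : Int),
       md + (P.countP (fun p => !decide (p ≤ A) && decide (p ≤ B)) : Int),
       mx + (P.countP (fun p => !decide (p ≤ A) && !decide (p ≤ B)) : Int)) := by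
  intro P
  induction P with
  | nil => intro mn md mx; simp [List.countP]
  | cons h t ih =>
    intro mn md mx
    by_cases h1 : h ≤ A
    · simp [List.foldl_cons, h1, ih]; omega
    · by_cases h2 : h ≤ B
      · simp [List.foldl_cons, h1, h2, ih]; omega
      · simp [List.foldl_cons, h1, h2, ih]; omega

theorem count_ge_of_le (s : List Int) (x : Int)
    (hs : s.Pairwise (· ≤ ·)) (i : Nat) (hi : i < s.length) (hx : s[i] ≤ x) :
    i + 1 ≤ s.countP (fun p => decide (p ≤ x)) := by
  have hpair := List.pairwise_iff_getElem.mp hs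
  have htd : s = s.take (i + 1) ++ s.drop (i + 1) := (List.take_append_drop _ _).symm
  have hlen : (s.take (i + 1)).length = i + 1 := by
    simp [List.length_take]; omega
  have hall : ∀ a ∈ s.take (i + 1), (fun p => decide (p ≤ x)) a = true := by
    intro a ha
    obtain ⟨j, hj, hja⟩ := List.mem_iff_getElem.mp ha
    rw [List.getElem_take] at hja
    have hji : j ≤ i := by rw [hlen] at hj; omega
    have : s[j] ≤ s[i] := by
      rcases Nat.lt_or_ge j i with hlt | hge
      · exact hpair j i (by omega) hi hlt
      · have : j = i := by omega
        subst this; exact le_refl _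
    simp [← hja]
    omega
  calc i + 1 = (s.take (i + 1)).countP (fun p => decide (p ≤ x)) := by
        rw [List.countP_eq_length.mpr hall, hlen]
    _ ≤ s.countP (fun p => decide (p ≤ x)) := by
        conv_rhs => rw [htd]
        rw [List.countP_append]; omega

theorem count_le_of_gt (s : List Int) (x : Int)
    (hs : s.Pairwise (· ≤ ·)) (i : Nat) (hi : i < s.length) (hx : ¬ s[i] ≤ x) :
    s.countP (fun p => decide (p ≤ x)) ≤ i := by
  have hpair := List.pairwise_iff_getElem.mp hs
  have htd : s = s.take i ++ s.drop i := (List.take_append_drop _ _).symm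
  have hdrop : (s.drop i).countP (fun p => decide (p ≤ x)) = 0 := by
    rw [List.countP_eq_zero]
    intro a ha
    obtain ⟨j, hj, hja⟩ := List.mem_iff_getElem.mp ha
    have hj' : i + j < s.length := by simp [List.length_drop] at hj; omega
    rw [List.getElem_drop] at hja
    have : s[i] ≤ s[i + j]'hj' := by
      rcases Nat.eq_zero_or_pos j with h0 | hpos
      · subst h0; simp
      · exact hpair i (i + j) hi hj' (by omega)
    simp [← hja]
    omega
  calc s.countP (fun p => decide (p ≤ x))
      = (s.take i).countP _ + (s.drop i).countP _ := by
        conv_lhs => rw [htd]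
        rw [List.countP_append]
    _ ≤ (s.take i).length + 0 := by rw [hdrop]; exact Nat.add_le_add_right List.countP_le_length 0
    _ ≤ i := by simp [List.length_take]

theorem scanLe_sorted (s : List Int) (x : Int) (hs : s.Pairwise (· ≤ ·)) :
    ∀ (n i : Nat), s.length - i ≤ n → i ≤ s.length →
      scanLe s x i = max i (s.countP (fun p => decide (p ≤ x))) := by
  intro n
  induction n with
  | zero =>
    intro i hn hi
    have hie : i = s.length := by omega
    rw [scanLe]
    have hc := List.countP_le_length (l := s) (p := fun p => decide (p ≤ x))
    simp [hie] at *
    omega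
  | succ m ih =>
    intro i hn hi
    rw [scanLe]
    by_cases h : i < s.length
    · by_cases hx : s[i] ≤ x
      · have hge := count_ge_of_le s x hs i h hx
        rw [dif_pos h, if_pos hx, ih (i + 1) (by omega) (by omega)]
        omega
      · have hle := count_le_of_gt s x hs i h hx
        rw [dif_pos h, if_neg hx]
        omega
    · have hie : i = s.length := by omega
      have hc := List.countP_le_length (l := s) (p := fun p => decide (p ≤ x))
      rw [dif_neg h]
      omega

-- the three bucket counts partition the list, and count(≤B) caps at the first boundary
theorem count_partition (A B : Int) (P : List Int) :
    P.countP (fun p => decide (p ≤ A)) + P.countP (fun p => !decide (p ≤ A) && decide (p ≤ B))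
      + P.countP (fun p => !decide (p ≤ A) && !decide (p ≤ B)) = P.length := by
  induction P with
  | nil => simp
  | cons h t ih =>
    simp only [List.countP_cons, List.length_cons]
    by_cases h1 : h ≤ A <;> by_cases h2 : h ≤ B <;> simp [h1, h2] <;> omega

theorem count_max (A B : Int) (P : List Int) :
    max (P.countP (fun p => decide (p ≤ A))) (P.countP (fun p => decide (p ≤ B)))
      = P.countP (fun p => decide (p ≤ A)) + P.countP (fun p => !decide (p ≤ A) && decide (p ≤ B)) := by
  by_cases hAB : A ≤ B
  · have hsplit : P.countP (fun p => decide (p ≤ B))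
        = P.countP (fun p => decide (p ≤ A)) + P.countP (fun p => !decide (p ≤ A) && decide (p ≤ B)) := by
      induction P with
      | nil => simp
      | cons h t ih =>
        simp only [List.countP_cons]
        by_cases h1 : h ≤ A <;> by_cases h2 : h ≤ B <;> simp [h1, h2] <;> omega
    have hmono : P.countP (fun p => decide (p ≤ A)) ≤ P.countP (fun p => decide (p ≤ B)) :=
      List.countP_mono_left (by intro a _ ha; simp at ha ⊢; omega)
    omega
  · have h2z : P.countP (fun p => !decide (p ≤ A) && decide (p ≤ B)) = 0 :=
      List.countP_eq_zero.mpr (by intro a _; simp; omega)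
    have hmono : P.countP (fun p => decide (p ≤ B)) ≤ P.countP (fun p => decide (p ≤ A)) :=
      List.countP_mono_left (by intro a _ ha; simp at ha ⊢; omega)
    omega

-- ===== VERDICT (by name: the statement is the Claim_ definition above) =====
theorem max_contests_spec : Claim_equal_max_contests := by
  intro N A B P _
  unfold Spec_max_contests max_contests max_contests_alt
  simp only []
  set s := PySem.List.sorted P (fun p => p) false with hsdef
  have hperm : s.Perm P := PySem.List.sorted_perm P (fun p => p) false
  have hpw : s.Pairwise (· ≤ ·) := PySem.List.sorted_pairwise P (fun p => p)
  have hA : ∀ x : Int, s.countP (fun p => decide (p ≤ x)) = P.countP (fun p => decide (p ≤ x)) :=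
    fun x => hperm.countP_eq _
  set c1 := P.countP (fun p => decide (p ≤ A)) with hc1
  set c2 := P.countP (fun p => !decide (p ≤ A) && decide (p ≤ B)) with hc2
  set c3 := P.countP (fun p => !decide (p ≤ A) && !decide (p ≤ B)) with hc3
  have hi : scanLe s A 0 = c1 := by
    rw [scanLe_sorted s A hpw s.length 0 (by omega) (by omega), hA]
    omega
  have hc1len : c1 ≤ s.length := by rw [hc1, ← hA A]; exact List.countP_le_length
  have hj : scanLe s B (scanLe s A 0) = c1 + c2 := by
    rw [hi, scanLe_sorted s B hpw s.length c1 (by omega) hc1len, hA]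
    have := count_max A B P
    omega
  rw [foldA_eq, hj, hi]
  have hlen : s.length = P.length := hperm.length_eq
  have hpart := count_partition A B P
  simp only [zero_add]
  rw [hlen]
  push_cast
  omega
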